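-- pv_equiv track=rewrite | github.com/ZeyuLiITP/jupyter | Trexquant/N_gram_pos_functions.py | possible_pattern
-- ===== SOURCE A (Python) =====
-- def possible_pattern_exact_pos(word,pos,n):
--     '''
--     give a masked word , and output all possible n-gram pattern for a exact masked letter
--     '''
--     shift = n-1
--     word_last_pos = len(word) - 1;
--     start = pos - shift;
--     start_list = list(range(start,start+n))
--     slice_list = [list(range(i,i+n)) for i in start_list ]
--     slice_list = list(filter((lambda x: x[0]>=0 and x[-1]<=word_last_pos) ,slice_list));
--
--     pattern_list = []
--     for poslist in slice_list:
--         pattern = '';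
--         for pos in poslist:
--             pattern += word[pos]
--
--         pattern_list.append((tuple(poslist),pattern))
--
--     pattern_list = list(filter(lambda x: x[1].count('.') == 1 ,pattern_list))
--     return pattern_list
--
-- def possible_pattern(word):
--     mask_id = [];
--     for i in range(len(word)):
--         if word[i] == '.':
--             mask_id.append(i)
--
--     pattern_list_all = [[] for i in mask_id];
--
--     for inx , i in enumerate(mask_id):
--         for n in range(1,3):
--             pattern_list = possible_pattern_exact_pos(word,i,n)
--             if pattern_list != []:
--                 pattern_list_all[inx] += pattern_list
--
--         #pattern_list_all[inx] = [(i,j) for j in pattern_list_all[inx]]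
--
--     return pattern_list_all
-- ===== SOURCE B (Python) =====
-- def possible_pattern(word):
--     masks = [i for i, c in enumerate(word) if c == '.']
--     slot = {i: k for k, i in enumerate(masks)}
--     out = [[((i,), '.')] for i in masks]
--     for j in range(len(word) - 1):
--         pair = word[j:j + 2]
--         if pair.count('.') == 1:
--             m = j if word[j] == '.' else j + 1
--             out[slot[m]].append(((j, j + 1), pair))
--     return out
-- ===== Notes on version B (the rewrite author's own statement) =====
-- stated objective: alternative
-- what changed: A gathers, for each mask, candidate n-gram windows regenerated around that mask (helper call per mask and per n); B emits all unigram rows up front and then makes one distribute pass over adjacent position pairs, routing each exactly-one-dot bigram to its mask's row via a position-to-slot dict.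
import Mathlib
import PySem

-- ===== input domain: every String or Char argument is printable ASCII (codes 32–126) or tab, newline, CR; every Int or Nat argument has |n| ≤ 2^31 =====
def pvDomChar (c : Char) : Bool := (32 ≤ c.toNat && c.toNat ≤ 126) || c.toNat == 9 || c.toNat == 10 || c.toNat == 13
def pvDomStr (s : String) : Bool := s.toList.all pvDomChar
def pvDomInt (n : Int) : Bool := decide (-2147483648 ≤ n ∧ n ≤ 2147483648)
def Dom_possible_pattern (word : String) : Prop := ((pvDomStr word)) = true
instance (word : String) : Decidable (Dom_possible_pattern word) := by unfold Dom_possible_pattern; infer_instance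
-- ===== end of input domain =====

-- B re-groups A's per-mask window generation into one distribute pass over adjacent pairs
-- with a position→slot table (objective: alternative decomposition, same asymptotic cost).

-- ===== PORT A =====
-- Python strings are carried as List Char (PySem convention); word[pos] inside the loop is
-- PySem.List.pyGetD — every index reaching it has passed A's own bounds filter, so the
-- default is never used and the port is exact.
def possible_pattern_exact_pos (word : String) (pos n : Int) : List (List Int × String) :=
  let cs := word.toList
  let shift := n - 1
  let word_last_pos := PySem.Str.len word - 1
  let start := pos - shift
  let start_list := PySem.List.pyRange start (start + n) 1
  let slice_list := start_list.map (fun i => PySem.List.pyRange i (i + n) 1)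
  let slice_list := slice_list.filter
    (fun x => decide (0 ≤ PySem.List.pyGetD x 0 0 ∧ PySem.List.pyGetD x (-1) 0 ≤ word_last_pos))
  let pattern_list := slice_list.foldl (fun acc poslist =>
      acc ++ [(poslist,
        String.ofList (poslist.foldl (fun p q => p ++ [PySem.List.pyGetD cs q ' ']) []))]) []
  pattern_list.filter (fun x => PySem.Str.count x.2 "." == 1)

def possible_pattern (word : String) : List (List (List Int × String)) :=
  let cs := word.toList
  let mask_id := (PySem.List.pyRange 0 (PySem.Str.len word) 1).foldl
      (fun acc i => if PySem.List.pyGetD cs i ' ' == '.' then acc ++ [i] else acc) []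
  let init : List (List (List Int × String)) := mask_id.map (fun _ => [])
  (PySem.List.enumerate mask_id).foldl (fun all p =>
      (PySem.List.pyRange 1 3 1).foldl (fun all n =>
          let pattern_list := possible_pattern_exact_pos word p.2 n
          if pattern_list ≠ [] then
            PySem.List.pySetD all p.1 (PySem.List.pyGetD all p.1 [] ++ pattern_list)
          else all) all) init

-- ===== PORT B =====
-- slot[m] in Source B always hits an existing key (m is a mask position), so the total
-- Dict.getD is exact; pair.count('.') with the single-character needle "." is PySem.Str.count.
def possible_pattern_alt (word : String) : List (List (List Int × String)) :=
  let cs := word.toList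
  let masks := ((PySem.List.enumerate cs).filter (fun p => p.2 == '.')).map (fun p => p.1)
  let slot := (PySem.List.enumerate masks).foldl
      (fun d p => PySem.Dict.insert d p.2 p.1) (PySem.Dict.empty)
  let out := masks.map (fun i => [(([i] : List Int), ".")])
  (PySem.List.pyRange 0 (PySem.Str.len word - 1) 1).foldl (fun out j =>
      let pair := String.ofList (PySem.List.slice cs (some j) (some (j + 2)))
      if PySem.Str.count pair "." == 1 then
        let m := if PySem.List.pyGetD cs j ' ' == '.' then j else j + 1
        let k := PySem.Dict.getD slot m 0
        PySem.List.pySetD out k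
          (PySem.List.pyGetD out k [] ++ [(([j, j + 1] : List Int), pair)])
      else out) out

-- ===== PRECONDITION & SPEC =====
def Spec_possible_pattern (word : String) (out : List (List (List Int × String))) : Prop := out = possible_pattern_alt word
instance (word : String) (out : List (List (List Int × String))) : Decidable (Spec_possible_pattern word out) := by unfold Spec_possible_pattern; infer_instance

-- ===== CLAIM (what is proved, stated in full; the proofs are below) =====
def Claim_equal_possible_pattern : Prop := ∀ (word : String), Dom_possible_pattern word → Spec_possible_pattern word (possible_pattern word)

-- ===== LEMMAS AND PROOFS =====

-- the common normal form both ports are reduced to: the list of mask positions and the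
-- row emitted for one mask (unigram, then left bigram, then right bigram)
def pvMasks (cs : List Char) : List Int :=
  (PySem.List.pyRange 0 (PySem.List.len cs) 1).filter
    (fun j => PySem.List.pyGetD cs j ' ' == '.')

def pvRow (cs : List Char) (i : Int) : List (List Int × String) :=
  [([i], ".")] ++
  (if 1 ≤ i ∧ ¬ PySem.List.pyGetD cs (i-1) ' ' = '.' then
      [([i-1, i], String.ofList [PySem.List.pyGetD cs (i-1) ' ', '.'])] else []) ++
  (if i + 2 ≤ PySem.List.len cs ∧ ¬ PySem.List.pyGetD cs (i+1) ' ' = '.' then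
      [([i, i+1], String.ofList ['.', PySem.List.pyGetD cs (i+1) ' '])] else [])

lemma pvMasks_mem (cs : List Char) (i : Int) :
    i ∈ pvMasks cs ↔ 0 ≤ i ∧ i < PySem.List.len cs ∧ PySem.List.pyGetD cs i ' ' = '.' := by
  simp [pvMasks, PySem.List.mem_pyRange_one, and_assoc]

lemma pvMasks_pairwise (cs : List Char) : (pvMasks cs).Pairwise (· < ·) :=
  (PySem.List.pairwise_lt_pyRange_one 0 (PySem.List.len cs)).filter _

lemma pvCount_one (c : Char) :
    (PySem.Str.count (String.ofList [c]) "." == 1) = (c == '.') := by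
  by_cases h : c = '.'
  · subst h; decide
  · simp [PySem.Str.count, PySem.Chars.count, PySem.Chars.count.go, List.isPrefixOf, h,
      (show ¬ '.' = c from fun hh => h hh.symm)]

lemma pvCount_two (c d : Char) :
    (PySem.Str.count (String.ofList [c, d]) "." == 1)
      = ((c == '.') != (d == '.')) := by
  by_cases h : c = '.' <;> by_cases h' : d = '.'
  · subst h; subst h'; decide
  · subst h
    simp [PySem.Str.count, PySem.Chars.count, PySem.Chars.count.go, List.isPrefixOf, h',
      (show ¬ '.' = d from fun hh => h' hh.symm)]
  · subst h'
    simp [PySem.Str.count, PySem.Chars.count, PySem.Chars.count.go, List.isPrefixOf, h,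
      (show ¬ '.' = c from fun hh => h hh.symm)]
  · simp [PySem.Str.count, PySem.Chars.count, PySem.Chars.count.go, List.isPrefixOf, h, h',
      (show ¬ '.' = c from fun hh => h hh.symm), (show ¬ '.' = d from fun hh => h' hh.symm)]

lemma pvCCount2 (c d : Char) :
    PySem.Chars.count [c, d] ['.'] = (if c = '.' then 1 else 0) + (if d = '.' then 1 else 0) := by
  by_cases h : c = '.' <;> by_cases h' : d = '.' <;>
    simp [PySem.Chars.count, PySem.Chars.count.go, List.isPrefixOf, h, h',
      (show ∀ x : Char, ¬ x = '.' → ¬ '.' = x from fun x hx hh => hx hh.symm)]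

lemma pvSlice_two (cs : List Char) (j : Int) (h0 : 0 ≤ j) (h2 : j + 2 ≤ PySem.List.len cs) :
    PySem.List.slice cs (some j) (some (j + 2))
      = [PySem.List.pyGetD cs j ' ', PySem.List.pyGetD cs (j+1) ' '] := by
  have hlen : j.toNat + 2 ≤ cs.length := by simp [PySem.List.len_eq] at h2; omega
  rw [PySem.List.slice_toNat _ h0 (by omega)]
  rw [PySem.List.pyGetD_eq_getElem cs ' ' h0 (by omega),
      PySem.List.pyGetD_eq_getElem cs ' ' (by omega) (by omega)]
  have h1 : (j+2).toNat - j.toNat = 2 := by omega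
  have h3 : (j+1).toNat = j.toNat + 1 := by omega
  simp only [h1, h3]
  rw [List.drop_eq_getElem_cons (by omega : j.toNat < cs.length),
      List.drop_eq_getElem_cons (by omega : j.toNat + 1 < cs.length)]
  rfl

lemma pvFilter_single (r : List Int) (hr : r.Nodup) (p : Int → Bool) (y : Int)
    (hp : ∀ j ∈ r, p j → j = y) :
    r.filter p = if y ∈ r ∧ p y then [y] else [] := by
  induction r with
  | nil => simp
  | cons a r ih =>
    rcases List.nodup_cons.mp hr with ⟨ha, hr'⟩
    by_cases hpa : p a
    · have hay : a = y := hp a (List.mem_cons_self) hpa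
      subst hay
      have hnil : r.filter p = [] := by
        apply List.filter_eq_nil_iff.mpr
        intro b hb hpb
        exact ha ((hp b (List.mem_cons_of_mem _ hb) hpb) ▸ hb)
      simp [hpa, hnil]
    · rw [List.filter_cons_of_neg (by simpa using hpa),
        ih hr' (fun j hj hpj => hp j (List.mem_cons_of_mem _ hj) hpj)]
      by_cases hy : y ∈ r ∧ p y = true
      · rw [if_pos hy, if_pos ⟨List.mem_cons_of_mem _ hy.1, hy.2⟩]
      · rw [if_neg hy, if_neg]
        rintro ⟨hmem, hpy⟩
        rcases List.mem_cons.mp hmem with rfl | hmem'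
        · exact hpa hpy
        · exact hy ⟨hmem', hpy⟩

lemma pvFilter_pair (r : List Int) (hr : r.Pairwise (· < ·)) (p : Int → Bool) (x y : Int)
    (hxy : x < y) (hp : ∀ j ∈ r, p j → j = x ∨ j = y) :
    r.filter p = (if x ∈ r ∧ p x then [x] else []) ++ (if y ∈ r ∧ p y then [y] else []) := by
  induction r with
  | nil => simp
  | cons a r ih =>
    have hlt : ∀ b ∈ r, a < b := (List.pairwise_cons.mp hr).1
    have hr' := (List.pairwise_cons.mp hr).2
    have hanr : a ∉ r := fun hmem => lt_irrefl a (hlt a hmem)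
    have hnd : r.Nodup := hr'.imp (fun h => ne_of_lt h)
    by_cases hpa : p a
    · rcases hp a (List.mem_cons_self) hpa with rfl | rfl
      · -- a = x
        rw [List.filter_cons_of_pos hpa]
        rw [pvFilter_single r hnd p y (fun j hj hpj => by
          rcases hp j (List.mem_cons_of_mem _ hj) hpj with rfl | rfl
          · exact absurd hj hanr
          · rfl)]
        rw [if_pos (show a ∈ a :: r ∧ p a = true from ⟨List.mem_cons_self, hpa⟩)]
        have : (y ∈ a :: r) ↔ y ∈ r := by
          constructor
          · intro h; rcases List.mem_cons.mp h with h | h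
            · omega
            · exact h
          · exact List.mem_cons_of_mem _
        by_cases hy : y ∈ r ∧ p y = true
        · rw [if_pos (show y ∈ r ∧ p y = true from hy),
            if_pos (show y ∈ a :: r ∧ p y = true from ⟨this.mpr hy.1, hy.2⟩)]
          rfl
        · rw [if_neg (show ¬(y ∈ r ∧ p y = true) from hy),
            if_neg (show ¬(y ∈ a :: r ∧ p y = true) from fun hc => hy ⟨this.mp hc.1, hc.2⟩)]
          rfl
      · -- a = y
        rw [List.filter_cons_of_pos hpa]
        have hnil : r.filter p = [] := by
          apply List.filter_eq_nil_iff.mpr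
          intro b hb hpb
          have := hlt b hb
          rcases hp b (List.mem_cons_of_mem _ hb) hpb with rfl | rfl <;> omega
        rw [hnil]
        rw [if_neg (show ¬(x ∈ a :: r ∧ p x = true) from fun hc => by
          rcases List.mem_cons.mp hc.1 with h | h
          · omega
          · exact absurd (hlt x h) (by omega))]
        rw [if_pos (show a ∈ a :: r ∧ p a = true from ⟨List.mem_cons_self, hpa⟩)]
        rfl
    · rw [List.filter_cons_of_neg (by simpa using hpa),
        ih hr' (fun j hj hpj => hp j (List.mem_cons_of_mem _ hj) hpj)]
      have hx : (x ∈ a :: r ∧ p x = true) ↔ (x ∈ r ∧ p x = true) := by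
        constructor
        · rintro ⟨hmem, hpx⟩
          rcases List.mem_cons.mp hmem with rfl | h
          · exact absurd hpx hpa
          · exact ⟨h, hpx⟩
        · rintro ⟨h, hpx⟩; exact ⟨List.mem_cons_of_mem _ h, hpx⟩
      have hy : (y ∈ a :: r ∧ p y = true) ↔ (y ∈ r ∧ p y = true) := by
        constructor
        · rintro ⟨hmem, hpy⟩
          rcases List.mem_cons.mp hmem with rfl | h
          · exact absurd hpy hpa
          · exact ⟨h, hpy⟩
        · rintro ⟨h, hpy⟩; exact ⟨List.mem_cons_of_mem _ h, hpy⟩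
      rw [if_congr hx rfl rfl, if_congr hy rfl rfl]

lemma pvDistrib {E : Type} (cond : Int → Bool) (t : Int → Int) (e : Int → E) :
    ∀ (js : List Int) (out : List (List E)),
    (∀ j ∈ js, cond j → 0 ≤ t j ∧ t j < (out.length : Int)) →
    js.foldl (fun out j => if cond j then
        PySem.List.pySetD out (t j) (PySem.List.pyGetD out (t j) [] ++ [e j]) else out) out
    = out.mapIdx (fun k v => v ++ (js.filter (fun j => cond j && (t j == (k : Int)))).map e) := by
  intro js
  induction js with
  | nil => intro out _; apply List.ext_getElem <;> simp
  | cons j js ih =>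
    intro out hb
    by_cases hc : cond j
    · have hbj := hb j (List.mem_cons_self) hc
      have hlt : (t j).toNat < out.length := by omega
      rw [List.foldl_cons, if_pos hc]
      rw [PySem.List.pySetD_of_nonneg _ _ hbj.1,
          PySem.List.pyGetD_eq_getElem _ _ hbj.1 (by simpa using hbj.2)]
      rw [ih _ (by intro j' hj' hc'; simpa using hb j' (List.mem_cons_of_mem _ hj') hc')]
      apply List.ext_getElem
      · simp
      · intro k hk1 hk2
        simp only [List.getElem_mapIdx, List.getElem_set, List.length_mapIdx, List.length_set] at *
        by_cases hkt : (t j).toNat = k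
        · subst hkt
          rw [if_pos rfl]
          rw [List.filter_cons_of_pos (by simp [hc]; omega)]
          simp [List.append_assoc]
        · rw [if_neg hkt]
          rw [List.filter_cons_of_neg (by simp [hc]; omega)]
    · rw [List.foldl_cons, if_neg hc]
      rw [ih _ (by intro j' hj' hc'; exact hb j' (List.mem_cons_of_mem _ hj') hc')]
      congr 1
      funext k v
      rw [List.filter_cons_of_neg (by simp [hc])]

lemma pvDict_untouched (ms : List Int) : ∀ (s : Int) (d : PySem.Dict Int Int) (x : Int), x ∉ ms →
    ((PySem.List.enumerate ms s).foldl (fun d p => PySem.Dict.insert d p.2 p.1) d).get? x = d.get? x := by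
  induction ms with
  | nil => intro s d x _; simp [PySem.List.enumerate_nil]
  | cons m ms ih =>
    intro s d x hx
    rw [PySem.List.enumerate_cons, List.foldl_cons]
    rw [ih (s+1) _ x (fun h => hx (List.mem_cons_of_mem _ h))]
    exact PySem.Dict.get?_insert_of_ne _ _ (fun h => hx (h ▸ List.mem_cons_self))

lemma pvDict_lookup (ms : List Int) : ∀ (s : Int) (d : PySem.Dict Int Int), ms.Nodup →
    ∀ (k : Nat) (hk : k < ms.length),
    ((PySem.List.enumerate ms s).foldl (fun d p => PySem.Dict.insert d p.2 p.1) d).get? ms[k]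
      = some (s + k) := by
  induction ms with
  | nil => intro _ _ _ k hk; simp at hk
  | cons m ms ih =>
    intro s d hnd k hk
    rcases List.nodup_cons.mp hnd with ⟨hm, hnd'⟩
    rw [PySem.List.enumerate_cons, List.foldl_cons]
    match k with
    | 0 =>
      simp only [List.getElem_cons_zero]
      rw [pvDict_untouched ms (s+1) _ m hm]
      simp [PySem.Dict.get?_insert_self]
    | Nat.succ k' =>
      simp only [List.getElem_cons_succ]
      rw [ih (s+1) _ hnd' k' (by simpa using hk)]
      congr 1
      push_cast
      ring

lemma pvExact1 (word : String) (i : Int) (h0 : 0 ≤ i) (h1 : i < PySem.List.len word.toList)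
    (hd : PySem.List.pyGetD word.toList i ' ' = '.') :
    possible_pattern_exact_pos word i 1 = [(([i] : List Int), ".")] := by
  unfold possible_pattern_exact_pos
  have e0 : i - ((1:Int) - 1) = i := by ring
  have hl : PySem.Str.len word = PySem.List.len word.toList := by
    simp [PySem.Str.len_eq, PySem.List.len_eq]
  simp only [e0, hl]
  simp only [PySem.List.pyRange_one_singleton]
  simp only [List.map_cons, List.map_nil, List.filter]
  have g0 : PySem.List.pyGetD [i] 0 0 = i := PySem.List.pyGetD_zero_cons _ _ _
  have g1 : PySem.List.pyGetD [i] (-1) 0 = i := by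
    rw [PySem.List.pyGetD_neg_one _ _ (by simp)]; simp
  rw [g0, g1, decide_eq_true (show 0 ≤ i ∧ i ≤ PySem.List.len word.toList - 1 by omega)]
  simp only [List.foldl_cons, List.foldl_nil, List.nil_append, hd, List.filter]
  rw [pvCount_one]
  rfl

lemma pvExact2 (word : String) (i : Int) (h0 : 0 ≤ i) (h1 : i < PySem.List.len word.toList)
    (hd : PySem.List.pyGetD word.toList i ' ' = '.') :
    possible_pattern_exact_pos word i 2 =
      (if 1 ≤ i ∧ ¬ PySem.List.pyGetD word.toList (i-1) ' ' = '.' then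
          [([i-1, i], String.ofList [PySem.List.pyGetD word.toList (i-1) ' ', '.'])] else []) ++
      (if i + 2 ≤ PySem.List.len word.toList ∧ ¬ PySem.List.pyGetD word.toList (i+1) ' ' = '.' then
          [([i, i+1], String.ofList ['.', PySem.List.pyGetD word.toList (i+1) ' '])] else []) := by
  unfold possible_pattern_exact_pos
  have hl : PySem.Str.len word = PySem.List.len word.toList := by
    simp [PySem.Str.len_eq, PySem.List.len_eq]
  have e0 : i - ((2:Int) - 1) = i - 1 := by ring
  have r1 : PySem.List.pyRange (i - 1) (i - 1 + 2) 1 = [i-1, i] := by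
    rw [PySem.List.pyRange_one_cons (by omega), PySem.List.pyRange_one_cons (by omega),
        PySem.List.pyRange_one_eq_nil (by omega)]
    norm_num
  have r2 : PySem.List.pyRange i (i + 2) 1 = [i, i+1] := by
    rw [PySem.List.pyRange_one_cons (by omega), PySem.List.pyRange_one_cons (by omega),
        PySem.List.pyRange_one_eq_nil (by omega)]
  simp only [e0, hl, r1, List.map_cons, List.map_nil, r2]
  have gA0 : PySem.List.pyGetD [i-1, i] (0:Int) 0 = i-1 := PySem.List.pyGetD_zero_cons _ _ _
  have gA1 : PySem.List.pyGetD [i-1, i] (-1:Int) 0 = i := by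
    rw [PySem.List.pyGetD_neg_one _ _ (by simp)]; simp
  have gB0 : PySem.List.pyGetD [i, i+1] (0:Int) 0 = i := PySem.List.pyGetD_zero_cons _ _ _
  have gB1 : PySem.List.pyGetD [i, i+1] (-1:Int) 0 = i+1 := by
    rw [PySem.List.pyGetD_neg_one _ _ (by simp)]; simp
  simp only [List.filter_cons, List.filter_nil, gA0, gA1, gB0, gB1]
  by_cases hL : 1 ≤ i
  · rw [decide_eq_true (show (0:Int) ≤ i-1 ∧ i ≤ PySem.List.len word.toList - 1 from by omega)]
    by_cases hR : i + 2 ≤ PySem.List.len word.toList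
    · rw [decide_eq_true (show (0:Int) ≤ i ∧ i+1 ≤ PySem.List.len word.toList - 1 from by omega)]
      by_cases hcL : PySem.List.pyGetD word.toList (i-1) ' ' = '.' <;>
        by_cases hcR : PySem.List.pyGetD word.toList (i+1) ' ' = '.' <;>
        simp [hd, pvCCount2, hcL, hcR, hL, PySem.Str.count, (show (i:Int) + 2 ≤ (word.length:Int) by simpa using hR)]
    · rw [decide_eq_false (show ¬((0:Int) ≤ i ∧ i+1 ≤ PySem.List.len word.toList - 1) from by omega)]
      by_cases hcL : PySem.List.pyGetD word.toList (i-1) ' ' = '.' <;>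
        simp [hd, pvCCount2, hcL, hL, PySem.Str.count, (show ¬((i:Int) + 2 ≤ (word.length:Int)) by simpa using hR)]
  · rw [decide_eq_false (show ¬((0:Int) ≤ i-1 ∧ i ≤ PySem.List.len word.toList - 1) from by omega)]
    by_cases hR : i + 2 ≤ PySem.List.len word.toList
    · rw [decide_eq_true (show (0:Int) ≤ i ∧ i+1 ≤ PySem.List.len word.toList - 1 from by omega)]
      by_cases hcR : PySem.List.pyGetD word.toList (i+1) ' ' = '.' <;>
        simp [hd, pvCCount2, hcR, PySem.Str.count, (show (i:Int) + 2 ≤ (word.length:Int) by simpa using hR), (show ¬(1 ≤ i) from hL)]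
    · rw [decide_eq_false (show ¬((0:Int) ≤ i ∧ i+1 ≤ PySem.List.len word.toList - 1) from by omega)]
      simp [(show ¬(1 ≤ i) from hL), (show ¬((i:Int) + 2 ≤ (word.length:Int)) by simpa using hR)]

lemma pvAfold (word : String) :
    ∀ (xs : List Int) (pre : List (List (List Int × String))),
    (∀ i ∈ xs, 0 ≤ i ∧ i < PySem.List.len word.toList ∧ PySem.List.pyGetD word.toList i ' ' = '.') →
    (PySem.List.enumerate xs (pre.length : Int)).foldl (fun all p =>
      (PySem.List.pyRange 1 3 1).foldl (fun all n =>
          let pattern_list := possible_pattern_exact_pos word p.2 n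
          if pattern_list ≠ [] then
            PySem.List.pySetD all p.1 (PySem.List.pyGetD all p.1 [] ++ pattern_list)
          else all) all) (pre ++ xs.map (fun _ => []))
    = pre ++ xs.map (pvRow word.toList) := by
  intro xs
  induction xs with
  | nil => intro pre _; simp [PySem.List.enumerate_nil]
  | cons i xs ih =>
    intro pre hprops
    obtain ⟨hi0, hi1, hid⟩ := hprops i List.mem_cons_self
    rw [PySem.List.enumerate_cons, List.foldl_cons]
    rw [show PySem.List.pyRange 1 3 1 = [1, 2] from by decide]
    simp only [List.foldl_cons, List.foldl_nil]
    rw [pvExact1 word i hi0 hi1 hid, pvExact2 word i hi0 hi1 hid]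
    set e2 := (if 1 ≤ i ∧ ¬ PySem.List.pyGetD word.toList (i-1) ' ' = '.' then
          [([i-1, i], String.ofList [PySem.List.pyGetD word.toList (i-1) ' ', '.'])] else []) ++
      (if i + 2 ≤ PySem.List.len word.toList ∧ ¬ PySem.List.pyGetD word.toList (i+1) ' ' = '.' then
          [([i, i+1], String.ofList ['.', PySem.List.pyGetD word.toList (i+1) ' '])] else []) with he2
    have hstep1 : PySem.List.pySetD (pre ++ ([] : List (List Int × String)) :: List.map (fun _ => []) xs) ((pre.length : Int))
        (PySem.List.pyGetD (pre ++ ([] : List (List Int × String)) :: List.map (fun _ => []) xs) ((pre.length : Int)) [] ++ [(([i] : List Int), ".")])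
        = pre ++ [(([i] : List Int), ".")] :: List.map (fun _ => ([] : List (List Int × String))) xs := by
      rw [PySem.List.pyGetD_natCast, PySem.List.pySetD_natCast]
      simp [List.getD, List.getElem?_append_right]
    simp only [List.map_cons]
    simp only [if_pos (by simp : ([(([i] : List Int), ".")] : List (List Int × String)) ≠ []), hstep1]
    have hstep2 : (if e2 ≠ [] then
        PySem.List.pySetD (pre ++ ([(([i] : List Int), ".")]) :: List.map (fun _ => ([] : List (List Int × String))) xs) ((pre.length : Int))
          (PySem.List.pyGetD (pre ++ ([(([i] : List Int), ".")]) :: List.map (fun _ => ([] : List (List Int × String))) xs) ((pre.length : Int)) [] ++ e2)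
      else (pre ++ ([(([i] : List Int), ".")]) :: List.map (fun _ => ([] : List (List Int × String))) xs))
        = pre ++ (pvRow word.toList i) :: List.map (fun _ => ([] : List (List Int × String))) xs := by
      have hrow : pvRow word.toList i = [(([i] : List Int), ".")] ++ e2 := by
        rw [pvRow, he2, List.append_assoc]
      by_cases h : e2 = []
      · rw [if_neg (by simpa using h)]
        rw [hrow, h]
        simp
      · rw [if_pos h]
        rw [PySem.List.pyGetD_natCast, PySem.List.pySetD_natCast, hrow]
        simp [List.getD, List.getElem?_append_right]
    rw [hstep2]
    have hlen : ((pre ++ [pvRow word.toList i]).length : Int) = (pre.length : Int) + 1 := by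
      simp
    have := ih (pre ++ [pvRow word.toList i])
      (fun j hj => hprops j (List.mem_cons_of_mem _ hj))
    rw [hlen] at this
    rw [show PySem.List.pyRange 1 3 1 = [1, 2] from by decide] at this
    simp only [List.foldl_cons, List.foldl_nil] at this
    simpa using this

lemma pvA_eq (word : String) :
    possible_pattern word = (pvMasks word.toList).map (pvRow word.toList) := by
  unfold possible_pattern
  dsimp only
  have hl : PySem.Str.len word = PySem.List.len word.toList := by
    simp [PySem.Str.len_eq, PySem.List.len_eq]
  rw [PySem.List.foldl_append_if (fun i => PySem.List.pyGetD word.toList i ' ' == '.') (fun i => i)]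
  simp only [List.nil_append, List.map_id', hl]
  have := pvAfold word (pvMasks word.toList) []
    (fun i hi => (pvMasks_mem word.toList i).mp hi)
  simpa [pvMasks] using this

lemma pvBrow (cs : List Char) (slot : PySem.Dict Int Int)
    (hlook : ∀ (k' : Nat), (hk' : k' < (pvMasks cs).length) →
      PySem.Dict.getD slot (pvMasks cs)[k'] 0 = (k' : Int))
    (k : Nat) (hk : k < (pvMasks cs).length) :
    [(([(pvMasks cs)[k]] : List Int), ".")] ++
      ((PySem.List.pyRange 0 (PySem.List.len cs - 1) 1).filter
        (fun j => (PySem.Str.count (String.ofList (PySem.List.slice cs (some j) (some (j + 2)))) "." == 1)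
          && (PySem.Dict.getD slot (if PySem.List.pyGetD cs j ' ' == '.' then j else j + 1) 0 == (k : Int)))).map
        (fun j => (([j, j + 1] : List Int), String.ofList (PySem.List.slice cs (some j) (some (j + 2)))))
      = pvRow cs (pvMasks cs)[k] := by
  set masks := pvMasks cs with hmasks
  set L := PySem.List.len cs with hLdef
  set i := masks[k] with hidef
  have hnd : masks.Nodup := (pvMasks_pairwise cs).imp (fun h => ne_of_lt h)
  obtain ⟨hi0, hi1, hidot⟩ := (pvMasks_mem cs i).mp (masks.getElem_mem hk)
  -- index lookup of a mask position equals k iff the position is i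
  have hidx : ∀ m : Int, m ∈ masks →
      ((PySem.Dict.getD slot m 0 == (k : Int)) = true ↔ m = i) := by
    intro m hm
    obtain ⟨k', hk', hk'eq⟩ := List.mem_iff_getElem.mp hm
    subst hk'eq
    rw [hlook k' hk']
    constructor
    · intro h
      have : k' = k := by simpa using h
      subst this; rfl
    · intro h
      have : k' = k := (List.Nodup.getElem_inj_iff hnd).mp h
      subst this; simp
  -- the filter predicate only fires at i-1 and i
  have hp : ∀ j ∈ PySem.List.pyRange 0 (L - 1) 1,
      ((PySem.Str.count (String.ofList (PySem.List.slice cs (some j) (some (j + 2)))) "." == 1)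
        && (PySem.Dict.getD slot (if PySem.List.pyGetD cs j ' ' == '.' then j else j + 1) 0 == (k : Int))) = true →
      j = i - 1 ∨ j = i := by
    intro j hj hpj
    rw [PySem.List.mem_pyRange_one] at hj
    rw [Bool.and_eq_true] at hpj
    obtain ⟨hc, ht⟩ := hpj
    rw [pvSlice_two cs j hj.1 (by omega), pvCount_two] at hc
    by_cases hd : PySem.List.pyGetD cs j ' ' = '.'
    · have hm : (if PySem.List.pyGetD cs j ' ' == '.' then j else j + 1) = j := by simp [hd]
      rw [hm] at ht
      right
      have hjm : j ∈ masks := (pvMasks_mem cs j).mpr ⟨hj.1, by omega, hd⟩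
      exact (hidx j hjm).mp ht
    · have hd1 : PySem.List.pyGetD cs (j+1) ' ' = '.' := by
        simp [hd] at hc
        exact hc
      have hm : (if PySem.List.pyGetD cs j ' ' == '.' then j else j + 1) = j + 1 := by simp [hd]
      rw [hm] at ht
      left
      have hjm : j + 1 ∈ masks := (pvMasks_mem cs (j+1)).mpr ⟨by omega, by omega, hd1⟩
      have := (hidx (j+1) hjm).mp ht
      omega
  rw [pvFilter_pair _ (PySem.List.pairwise_lt_pyRange_one 0 (L-1)) _ (i-1) i (by omega) hp]
  rw [List.map_append]
  rw [pvRow, ← hLdef, List.append_assoc]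
  congr 1
  congr 1
  · -- left bigram
    by_cases h1i : 1 ≤ i
    · by_cases hcL : PySem.List.pyGetD cs (i-1) ' ' = '.'
      · rw [if_neg (show ¬(1 ≤ i ∧ ¬PySem.List.pyGetD cs (i - 1) ' ' = '.') from fun h => h.2 hcL)]
        rw [if_neg, List.map_nil]
        rintro ⟨-, hpred⟩
        rw [Bool.and_eq_true] at hpred
        have hc := hpred.1
        rw [pvSlice_two cs (i-1) (by omega) (by omega), pvCount_two,
          (show i - 1 + 1 = i from by ring), hidot, hcL] at hc
        simp at hc
      · rw [if_pos (show (1 ≤ i ∧ ¬PySem.List.pyGetD cs (i - 1) ' ' = '.') from ⟨h1i, hcL⟩)]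
        rw [if_pos, List.map_cons, List.map_nil]
        · rw [pvSlice_two cs (i-1) (by omega) (by omega),
            (show i - 1 + 1 = i from by ring), hidot]
        · constructor
          · rw [PySem.List.mem_pyRange_one]; omega
          · rw [Bool.and_eq_true]
            constructor
            · rw [pvSlice_two cs (i-1) (by omega) (by omega), pvCount_two,
                (show i - 1 + 1 = i from by ring), hidot]
              simp [hcL]
            · rw [(show (if PySem.List.pyGetD cs (i-1) ' ' == '.' then i-1 else i-1+1) = i from by
                  rw [if_neg (by simpa using hcL)]; omega)]
              rw [(show PySem.Dict.getD slot i 0 = (k : Int) from by rw [hidef]; exact hlook k hk)]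
              simp
    · rw [if_neg (show ¬(1 ≤ i ∧ ¬PySem.List.pyGetD cs (i - 1) ' ' = '.') from fun h => h1i h.1)]
      rw [if_neg, List.map_nil]
      rintro ⟨hmem', -⟩
      rw [PySem.List.mem_pyRange_one] at hmem'
      omega
  · -- right bigram
    by_cases h2i : i + 2 ≤ L
    · by_cases hcR : PySem.List.pyGetD cs (i+1) ' ' = '.'
      · rw [if_neg (show ¬(i + 2 ≤ L ∧ ¬PySem.List.pyGetD cs (i + 1) ' ' = '.') from fun h => h.2 hcR)]
        rw [if_neg, List.map_nil]
        rintro ⟨-, hpred⟩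
        rw [Bool.and_eq_true] at hpred
        have hc := hpred.1
        rw [pvSlice_two cs i (by omega) (by omega), pvCount_two, hidot, hcR] at hc
        simp at hc
      · rw [if_pos (show (i + 2 ≤ L ∧ ¬PySem.List.pyGetD cs (i + 1) ' ' = '.') from ⟨h2i, hcR⟩)]
        rw [if_pos, List.map_cons, List.map_nil]
        · rw [pvSlice_two cs i (by omega) (by omega), hidot]
        · constructor
          · rw [PySem.List.mem_pyRange_one]; omega
          · rw [Bool.and_eq_true]
            constructor
            · rw [pvSlice_two cs i (by omega) (by omega), pvCount_two, hidot]
              simp [hcR]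
            · rw [(show (if PySem.List.pyGetD cs i ' ' == '.' then i else i+1) = i from by
                  rw [if_pos (by simpa using hidot)])]
              rw [(show PySem.Dict.getD slot i 0 = (k : Int) from by rw [hidef]; exact hlook k hk)]
              simp
    · rw [if_neg (show ¬(i + 2 ≤ L ∧ ¬PySem.List.pyGetD cs (i + 1) ' ' = '.') from fun h => h2i h.1)]
      rw [if_neg, List.map_nil]
      rintro ⟨hmem', -⟩
      rw [PySem.List.mem_pyRange_one] at hmem'
      omega

lemma pvB_eq (word : String) :
    possible_pattern_alt word = (pvMasks word.toList).map (pvRow word.toList) := by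
  unfold possible_pattern_alt
  dsimp only
  set cs := word.toList with hcs
  have hml : ((PySem.List.enumerate cs).filter (fun p => p.2 == '.')).map (fun p => p.1)
      = pvMasks cs := by
    rw [PySem.List.enumerate_eq_map_pyRange cs ' ']
    simp [pvMasks, List.filter_map, Function.comp_def]
  rw [hml]
  set masks := pvMasks cs with hmasks
  set slot := (PySem.List.enumerate masks).foldl
      (fun d p => PySem.Dict.insert d p.2 p.1) (PySem.Dict.empty) with hslot
  have hnd : masks.Nodup := (pvMasks_pairwise cs).imp (fun h => ne_of_lt h)
  have hlook : ∀ (k' : Nat), (hk' : k' < masks.length) →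
      PySem.Dict.getD slot masks[k'] 0 = (k' : Int) := by
    intro k' hk'
    rw [hslot, PySem.Dict.getD, pvDict_lookup masks 0 _ hnd k' hk']
    simp
  have hL : PySem.Str.len word = PySem.List.len cs := by
    simp [PySem.Str.len_eq, PySem.List.len_eq, hcs]
  rw [hL]
  -- the distribute pass
  rw [pvDistrib
      (fun j => PySem.Str.count (String.ofList (PySem.List.slice cs (some j) (some (j + 2)))) "." == 1)
      (fun j => PySem.Dict.getD slot (if PySem.List.pyGetD cs j ' ' == '.' then j else j + 1) 0)
      (fun j => (([j, j + 1] : List Int), String.ofList (PySem.List.slice cs (some j) (some (j + 2)))))]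
  · apply List.ext_getElem
    · simp
    · intro k hk1 hk2
      simp only [List.getElem_mapIdx, List.getElem_map]
      have hk' : k < masks.length := by simpa using hk2
      have := pvBrow cs slot (by simpa [← hmasks] using hlook) k (by simpa [← hmasks] using hk')
      simpa [← hmasks] using this
  · -- in-range targets
    intro j hj hc
    rw [PySem.List.mem_pyRange_one] at hj
    rw [pvSlice_two cs j hj.1 (by omega), pvCount_two] at hc
    have hmm : (if PySem.List.pyGetD cs j ' ' == '.' then j else j + 1) ∈ masks := by
      by_cases hd : PySem.List.pyGetD cs j ' ' = '.'
      · rw [if_pos (by simpa using hd)]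
        exact (pvMasks_mem cs j).mpr ⟨hj.1, by omega, hd⟩
      · have hd1 : PySem.List.pyGetD cs (j+1) ' ' = '.' := by
          simp [hd] at hc; exact hc
        rw [if_neg (by simpa using hd)]
        exact (pvMasks_mem cs (j+1)).mpr ⟨by omega, by omega, hd1⟩
    obtain ⟨k', hk', hk'eq⟩ := List.mem_iff_getElem.mp hmm
    rw [← hk'eq, hlook k' hk']
    simp
    omega

-- ===== VERDICT (by name: the statement is the Claim_ definition above) =====
theorem possible_pattern_spec : Claim_equal_possible_pattern := by
  intro word _
  unfold Spec_possible_pattern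
  rw [pvA_eq, pvB_eq]
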